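-- pv_equiv track=rewrite | github.com/Betterslash/University | Algorithmics/SumOfSubArr/main.py | compute_max_value
-- ===== SOURCE A (Python) =====
-- def compute_max_value(arr):
--     lgt = len(arr)
--     odd_isum = 0
--     even_isum = 0
--     for i in range(lgt):
--         if i % 2 == 0:
--             even_isum += arr[i]
--         else:
--             odd_isum += arr[i]
--     res = even_isum - odd_isum
--     res = res * res
--     return res
-- ===== SOURCE B (Python) =====
-- def compute_max_value(arr):
--     s = 0
--     for x in reversed(arr):
--         s = x - s
--     return s * s
-- ===== Notes on version B (the rewrite author's own statement) =====
-- stated objective: simpler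
-- what changed: Replaced the index loop with parity branch and two accumulators by a single branch-free backward fold computing the alternating sum directly (s = x - s over reversed(arr)), then squaring.
import Mathlib
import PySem

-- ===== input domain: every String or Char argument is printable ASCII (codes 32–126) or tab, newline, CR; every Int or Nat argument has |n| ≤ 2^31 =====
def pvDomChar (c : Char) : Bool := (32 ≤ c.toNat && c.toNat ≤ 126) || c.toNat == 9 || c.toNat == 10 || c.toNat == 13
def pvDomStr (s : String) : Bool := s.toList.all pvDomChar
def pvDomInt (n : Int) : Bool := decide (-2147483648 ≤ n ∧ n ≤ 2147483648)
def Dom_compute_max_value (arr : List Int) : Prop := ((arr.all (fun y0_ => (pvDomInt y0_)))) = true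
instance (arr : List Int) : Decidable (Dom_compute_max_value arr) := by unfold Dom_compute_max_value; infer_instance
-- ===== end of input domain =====

-- B replaces A's index loop with parity branch by a branch-free backward fold of the alternating sum (simpler).


-- ===== PORT A =====
-- literal transliteration of A: for i in range(len(arr)): branch on i % 2, accumulate (odd_isum, even_isum)
def compute_max_value (arr : List Int) : Int :=
  let lgt : Int := arr.length
  let st :=
    (PySem.List.pyRange 0 lgt 1).foldl
      (fun (st : Int × Int) i =>
        if PySem.Int.mod i 2 == 0 then (st.1, st.2 + PySem.List.pyGetD arr i 0)
        else (st.1 + PySem.List.pyGetD arr i 0, st.2))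
      (0, 0)      -- (odd_isum, even_isum); i is always in range so pyGetD's default is never used
  let res := st.2 - st.1
  res * res

-- ===== PORT B =====
-- literal transliteration of B: s = 0; for x in reversed(arr): s = x - s; return s * s
def compute_max_value_alt (arr : List Int) : Int :=
  let s := arr.reverse.foldl (fun s x => x - s) 0
  s * s

-- ===== PRECONDITION & SPEC =====
def Spec_compute_max_value (arr : List Int) (out : Int) : Prop := out = compute_max_value_alt arr
instance (arr : List Int) (out : Int) : Decidable (Spec_compute_max_value arr out) := by unfold Spec_compute_max_value; infer_instance

-- ===== CLAIM (what is proved, stated in full; the proofs are below) =====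
def Claim_equal_compute_max_value : Prop := ∀ (arr : List Int), Dom_compute_max_value arr → Spec_compute_max_value arr (compute_max_value arr)

-- ===== LEMMAS AND PROOFS =====

-- the alternating sum a₀ - a₁ + a₂ - … of a list
def altSum : List Int → Int
  | [] => 0
  | x :: t => x - altSum t

-- B's backward fold computes the alternating sum
lemma altFold_eq (arr : List Int) : arr.reverse.foldl (fun s x => x - s) 0 = altSum arr := by
  rw [List.foldl_reverse]
  induction arr with
  | nil => rfl
  | cons x t ih => simp [altSum, ih]

-- A's loop invariant: processing indices a, a+1, … over the suffix arr.drop a adds (±) the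
-- alternating sum of that suffix to even_isum - odd_isum, with sign given by the parity of a.
lemma loop_diff (tail : List Int) : ∀ (arr : List Int) (a : Nat) (o e : Int),
    arr.drop a = tail → a ≤ arr.length →
    (((PySem.List.pyRange (a : Int) (arr.length : Int) 1).foldl
      (fun (st : Int × Int) i =>
        if PySem.Int.mod i 2 == 0 then (st.1, st.2 + PySem.List.pyGetD arr i 0)
        else (st.1 + PySem.List.pyGetD arr i 0, st.2))
      (o, e)).2
     - ((PySem.List.pyRange (a : Int) (arr.length : Int) 1).foldl
      (fun (st : Int × Int) i =>
        if PySem.Int.mod i 2 == 0 then (st.1, st.2 + PySem.List.pyGetD arr i 0)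
        else (st.1 + PySem.List.pyGetD arr i 0, st.2))
      (o, e)).1)
    = (e - o) + (if a % 2 = 0 then altSum tail else - altSum tail) := by
  induction tail with
  | nil =>
    intro arr a o e hdrop hle
    have hlen : a = arr.length := by
      have := List.drop_eq_nil_iff.mp hdrop
      omega
    rw [PySem.List.pyRange_one_eq_nil (by exact_mod_cast le_of_eq hlen.symm)]
    simp [altSum]
  | cons x t ih =>
    intro arr a o e hdrop hle
    have hlt : a < arr.length := by
      by_contra h
      have : arr.drop a = [] := List.drop_eq_nil_iff.mpr (by omega)
      rw [this] at hdrop; cases hdrop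
    have hx : PySem.List.pyGetD arr (a : Int) 0 = x := by
      rw [PySem.List.pyGetD_natCast]
      have h0 : (arr.drop a).getD 0 0 = x := by rw [hdrop]; rfl
      simpa [List.getD, List.getElem?_drop] using h0
    have ht : arr.drop (a + 1) = t := by
      have : arr.drop (a + 1) = (arr.drop a).tail := by
        rw [← List.drop_drop]; simp
      rw [this, hdrop]; rfl
    rw [PySem.List.pyRange_one_cons (by exact_mod_cast hlt)]
    have hmod : PySem.Int.mod (a : Int) 2 = ((a % 2 : Nat) : Int) := by
      exact_mod_cast PySem.Int.mod_natCast a 2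
    by_cases hpar : a % 2 = 0
    · have h2 : (a + 1) % 2 = 1 := by omega
      have key := ih arr (a + 1) o (e + x) ht (by omega)
      rw [h2] at key
      simp only [Nat.cast_add, Nat.cast_one] at key
      rw [if_neg (by decide)] at key
      simp only [List.foldl_cons, hmod, hpar, Nat.cast_zero, beq_self_eq_true, if_true, hx]
      rw [key]
      simp only [altSum]
      ring
    · have hpar1 : a % 2 = 1 := by omega
      have h2 : (a + 1) % 2 = 0 := by omega
      have key := ih arr (a + 1) (o + x) e ht (by omega)
      rw [h2] at key
      simp only [Nat.cast_add, Nat.cast_one] at key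
      simp only [if_true] at key
      simp only [List.foldl_cons, hmod, hpar1, Nat.cast_one, hx]
      rw [if_neg (by decide), key]
      simp only [if_neg (by decide : ¬(1 = 0)), altSum]
      ring

-- ===== VERDICT (by name: the statement is the Claim_ definition above) =====
theorem compute_max_value_spec : Claim_equal_compute_max_value := by
  intro arr _
  unfold Spec_compute_max_value compute_max_value compute_max_value_alt
  have h := loop_diff arr arr 0 0 0 (by simp) (Nat.zero_le _)
  simp only [Nat.cast_zero] at h
  simp only [if_true] at h
  dsimp only
  rw [altFold_eq, h]
  ring
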